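-- pv_equiv track=rewrite | github.com/sdytlm/sdytlm.github.io | downloads/code/LeetCode/Python/Kth-Smallest-Element-in-A-Sorted-Matrix.py | countLowerNumbers
-- ===== SOURCE A (Python) =====
-- def countLowerNumbers(matrix,mid_val):
--     # 从左下角开始统计相等或者小于mid_val的数量
--     n = len(matrix)
--     i = n-1
--     j = 0
--     cnt = 0
--     while i >=0 and j < n:
--         if mid_val >= matrix[i][j]:
--             # 整个一列都是小于mid_val
--             cnt += i+1
--             j += 1
--         else:
--             i -= 1
--     return cnt
-- ===== SOURCE B (Python) =====
-- def countLowerNumbers(matrix, mid_val):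
--     # per-column bottom-up rescan: for each column, find the highest still-reachable
--     # row whose entry is <= mid_val (never above the previous column's row)
--     n = len(matrix)
--     cnt = 0
--     b = n - 1
--     for j in range(n):
--         top = -1
--         for i in range(b + 1):
--             if matrix[i][j] <= mid_val:
--                 top = i
--         cnt += top + 1
--         b = top
--     return cnt
-- ===== Notes on version B (the rewrite author's own statement) =====
-- stated objective: alternative
-- what changed: Replaces A's single interleaved bottom-left staircase walk with a per-column loop that rescans each column bottom-up from row 0 to find the highest still-reachable row with entry <= mid_val, accumulating top+1 per column.
-- outside the precondition, e.g. on countLowerNumbers([[1], [0, 0]], 1): A returns 4, B raises IndexError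
import Mathlib
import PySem

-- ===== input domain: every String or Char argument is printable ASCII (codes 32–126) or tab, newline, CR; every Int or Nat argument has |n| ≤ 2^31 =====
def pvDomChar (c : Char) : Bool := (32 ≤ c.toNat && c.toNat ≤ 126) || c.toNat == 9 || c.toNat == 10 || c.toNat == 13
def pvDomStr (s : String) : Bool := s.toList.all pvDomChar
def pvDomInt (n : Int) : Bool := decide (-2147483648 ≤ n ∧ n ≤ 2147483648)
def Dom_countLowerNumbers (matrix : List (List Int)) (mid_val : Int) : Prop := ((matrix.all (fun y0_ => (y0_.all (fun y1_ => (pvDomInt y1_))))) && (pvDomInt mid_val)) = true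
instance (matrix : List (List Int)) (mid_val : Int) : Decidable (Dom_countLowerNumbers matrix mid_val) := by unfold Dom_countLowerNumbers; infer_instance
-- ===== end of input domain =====

-- B replaces A's interleaved staircase walk by a per-column bottom-up rescan for the highest
-- still-reachable row with entry ≤ mid_val (a different traversal of the same count; not faster).

-- ===== PORT A =====
-- the while loop of A; state (i, j, cnt); row reads in range under Pre_
def countLowerNumbersLoop (matrix : List (List Int)) (mid_val : Int) (n : Nat)
    (i : Int) (j : Nat) (cnt : Int) : Int :=
  if h : 0 ≤ i ∧ j < n then
    if mid_val ≥ (matrix.getD i.toNat []).getD j 0 then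
      countLowerNumbersLoop matrix mid_val n i (j + 1) (cnt + (i + 1))
    else
      countLowerNumbersLoop matrix mid_val n (i - 1) j cnt
  else cnt
termination_by (i + 1).toNat + (n - j)
decreasing_by all_goals omega

def countLowerNumbers (matrix : List (List Int)) (mid_val : Int) : Int :=
  countLowerNumbersLoop matrix mid_val matrix.length ((matrix.length : Int) - 1) 0 0

-- ===== PORT B =====
-- Source B's inner loop: `top = -1; for i in range(b + 1): if matrix[i][j] <= mid_val: top = i`
def colTop (matrix : List (List Int)) (mid_val : Int) (j : Nat) (b : Int) : Int :=
  (List.range (b + 1).toNat).foldl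
    (fun top i => if (matrix.getD i []).getD j 0 ≤ mid_val then (i : Int) else top) (-1)

-- Source B's outer loop over the columns, state (cnt, b)
def countLowerNumbers_alt (matrix : List (List Int)) (mid_val : Int) : Int :=
  ((List.range matrix.length).foldl
    (fun s j =>
      let top := colTop matrix mid_val j s.2
      (s.1 + top + 1, top))
    ((0 : Int), (matrix.length : Int) - 1)).1

-- ===== PRECONDITION & SPEC =====
-- Pre_ excludes ragged matrices (some row shorter than len(matrix)): B scans whole columns and
-- raises IndexError on a short row that A's staircase walk may happen to skip (on most ragged
-- inputs A itself raises IndexError).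
def Pre_countLowerNumbers (matrix : List (List Int)) (mid_val : Int) : Prop :=
  ∀ row ∈ matrix, matrix.length ≤ row.length

instance (matrix : List (List Int)) (mid_val : Int) : Decidable (Pre_countLowerNumbers matrix mid_val) := by
  unfold Pre_countLowerNumbers; infer_instance

def pvWitness_countLowerNumbers : List (List Int) × Int := ([[1, 2], [3, 4]], 2)

def Spec_countLowerNumbers (matrix : List (List Int)) (mid_val : Int) (out : Int) : Prop := out = countLowerNumbers_alt matrix mid_val
instance (matrix : List (List Int)) (mid_val : Int) (out : Int) : Decidable (Spec_countLowerNumbers matrix mid_val out) := by unfold Spec_countLowerNumbers; infer_instance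

-- ===== CLAIM (what is proved, stated in full; the proofs are below) =====
def Claim_equal_countLowerNumbers : Prop := ∀ (matrix : List (List Int)) (mid_val : Int), Dom_countLowerNumbers matrix mid_val → Pre_countLowerNumbers matrix mid_val → Spec_countLowerNumbers matrix mid_val (countLowerNumbers matrix mid_val)

-- ===== LEMMAS AND PROOFS =====

-- the row A's walk stops at in column j when entering it at row i (first entry ≤ mid_val, from i downward)
def dFind (matrix : List (List Int)) (mid_val : Int) (j : Nat) (i : Int) : Int :=
  if i < 0 then -1
  else if (matrix.getD i.toNat []).getD j 0 ≤ mid_val then i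
  else dFind matrix mid_val j (i - 1)
termination_by (i + 1).toNat
decreasing_by omega

lemma dFind_ge (matrix : List (List Int)) (mid_val : Int) (j : Nat) :
    ∀ (i : Int), -1 ≤ dFind matrix mid_val j i := by
  intro i
  induction hk : (i + 1).toNat using Nat.strong_induction_on generalizing i with
  | _ k ih =>
    rw [dFind]
    split_ifs with h1 h2
    · omega
    · omega
    · exact ih (i - 1 + 1).toNat (by omega) (i - 1) rfl

-- A's walk, entering column j < n at row i, descends to dFind and adds dFind + 1
lemma loop_step (matrix : List (List Int)) (mid_val : Int) (n : Nat) (j : Nat) (hj : j < n) :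
    ∀ (i : Int) (cnt : Int),
      countLowerNumbersLoop matrix mid_val n i j cnt
        = countLowerNumbersLoop matrix mid_val n (dFind matrix mid_val j i) (j + 1)
            (cnt + dFind matrix mid_val j i + 1) := by
  intro i
  induction hk : (i + 1).toNat using Nat.strong_induction_on generalizing i with
  | _ k ih =>
    intro cnt
    by_cases hneg : i < 0
    · rw [dFind, if_pos hneg]
      rw [countLowerNumbersLoop, dif_neg (by omega : ¬ (0 ≤ i ∧ j < n))]
      rw [countLowerNumbersLoop, dif_neg (by omega : ¬ (0 ≤ (-1 : Int) ∧ j + 1 < n))]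
      omega
    · rw [dFind, if_neg hneg]
      by_cases hle : (matrix.getD i.toNat []).getD j 0 ≤ mid_val
      · rw [if_pos hle]
        conv_lhs => rw [countLowerNumbersLoop]
        rw [dif_pos ⟨by omega, hj⟩, if_pos hle]
        have hc : cnt + (i + 1) = cnt + i + 1 := by omega
        rw [hc]
      · rw [if_neg hle]
        conv_lhs => rw [countLowerNumbersLoop]
        rw [dif_pos ⟨by omega, hj⟩, if_neg hle]
        exact ih (i - 1 + 1).toNat (by omega) (i - 1) rfl cnt

-- B's bottom-up rescan finds the same row as A's downward descent
lemma colTop_eq_dFind (matrix : List (List Int)) (mid_val : Int) (j : Nat) :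
    ∀ (b : Int), -1 ≤ b → colTop matrix mid_val j b = dFind matrix mid_val j b := by
  intro b
  induction hk : (b + 1).toNat using Nat.strong_induction_on generalizing b with
  | _ k ih =>
    intro hb
    by_cases hneg : b < 0
    · have hb1 : b = -1 := by omega
      subst hb1
      rw [dFind, if_pos (by omega : (-1 : Int) < 0)]
      simp [colTop]
    · have hk1 : (b + 1).toNat = b.toNat + 1 := by omega
      rw [colTop, hk1, List.range_succ, List.foldl_append]
      have hfold : (List.range b.toNat).foldl
          (fun top i => if (matrix.getD i []).getD j 0 ≤ mid_val then (i : Int) else top) (-1)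
          = colTop matrix mid_val j (b - 1) := by
        rw [colTop]
        have hbt : (b - 1 + 1).toNat = b.toNat := by omega
        rw [hbt]
      rw [hfold]
      rw [dFind, if_neg hneg]
      by_cases hle : (matrix.getD b.toNat []).getD j 0 ≤ mid_val
      · simp only [List.foldl_cons, List.foldl_nil, if_pos hle]
        omega
      · simp only [List.foldl_cons, List.foldl_nil, if_neg hle]
        by_cases hb0 : b = 0
        · subst hb0
          rw [dFind, if_pos (by omega : (0 : Int) - 1 < 0)]
          simp [colTop]
        · exact ih (b - 1 + 1).toNat (by omega) (b - 1) rfl (by omega)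

-- the count contributed by columns j, j+1, …, j+k-1, entering column j at row b
def colsSum (matrix : List (List Int)) (mid_val : Int) : Nat → Nat → Int → Int
  | 0, _, _ => 0
  | k + 1, j, b =>
      dFind matrix mid_val j b + 1
        + colsSum matrix mid_val k (j + 1) (dFind matrix mid_val j b)

lemma loop_eq_colsSum (matrix : List (List Int)) (mid_val : Int) (n : Nat) :
    ∀ (k j : Nat) (b cnt : Int), j + k = n →
      countLowerNumbersLoop matrix mid_val n b j cnt
        = cnt + colsSum matrix mid_val k j b := by
  intro k
  induction k with
  | zero =>
    intro j b cnt hjk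
    rw [countLowerNumbersLoop, dif_neg (by omega : ¬ (0 ≤ b ∧ j < n))]
    simp [colsSum]
  | succ k ih =>
    intro j b cnt hjk
    rw [loop_step matrix mid_val n j (by omega) b cnt]
    rw [ih (j + 1) _ _ (by omega)]
    simp only [colsSum]
    ring

lemma foldl_eq_colsSum (matrix : List (List Int)) (mid_val : Int) :
    ∀ (k j : Nat) (b cnt : Int), -1 ≤ b →
      (((List.range' j k).foldl
        (fun s j =>
          let top := colTop matrix mid_val j s.2
          (s.1 + top + 1, top))
        (cnt, b))).1 = cnt + colsSum matrix mid_val k j b := by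
  intro k
  induction k with
  | zero =>
    intro j b cnt hb
    simp [colsSum]
  | succ k ih =>
    intro j b cnt hb
    rw [List.range'_succ, List.foldl_cons]
    simp only
    rw [colTop_eq_dFind matrix mid_val j b hb]
    rw [ih (j + 1) _ _ (dFind_ge matrix mid_val j b)]
    simp only [colsSum]
    ring

-- ===== VERDICT (by name: the statement is the Claim_ definition above) =====
theorem countLowerNumbers_spec : Claim_equal_countLowerNumbers := by
  intro matrix mid_val hdom hpre
  unfold Spec_countLowerNumbers countLowerNumbers countLowerNumbers_alt
  rw [loop_eq_colsSum matrix mid_val matrix.length matrix.length 0 _ _ (by omega)]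
  rw [List.range_eq_range']
  rw [foldl_eq_colsSum matrix mid_val matrix.length 0 _ _ (by omega)]
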